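-- pv_equiv track=rewrite | github.com/siriusdevs/homeworks_23 | HW2/utilites.py | get_age_stats
-- ===== SOURCE A (Python) =====
-- def get_age_group(age: int) -> str:
--     """
--     Return age group for age.
--
--     Args:
--         age: age of client
--
--     Returns:
--         age group
--     """
--     age18 = 18
--     age25 = 25
--     age45 = 45
--     age60 = 60
--     if age < age18:
--         return '0-18'
--     elif age < age25:
--         return '18-25'
--     elif age < age45:
--         return '25-45'
--     elif age < age60:
--         return '45-60'
--     return '60+'
--
-- def get_age_stats(input_dict: dict) -> dict:
--     """
--     Calculate age stats for input_dict and return a dictionary with the stats.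
--
--     Args:
--         input_dict: dict with data about clients
--
--     Returns:
--         dict with age stats
--     """
--     age_stats = {
--         '0-18': 0,
--         '18-25': 0,
--         '25-45': 0,
--         '45-60': 0,
--         '60+': 0,
--     }
--     for user in input_dict.keys():
--         age = input_dict[user]['age']
--         age_group = get_age_group(age)
--         age_stats[age_group] += 1
--     return age_stats
-- ===== SOURCE B (Python) =====
-- def get_age_stats(input_dict: dict) -> dict:
--     """Bucket counts as differences of cumulative threshold counts (no per-client branching)."""
--     ages = [entry['age'] for entry in input_dict.values()]
--     cuts = [sum(age < bound for age in ages) for bound in (18, 25, 45, 60)]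
--     labels = ('0-18', '18-25', '25-45', '45-60', '60+')
--     lows = [0] + cuts
--     highs = cuts + [len(ages)]
--     return {label: hi - lo for label, lo, hi in zip(labels, lows, highs)}
-- ===== Notes on version B (the rewrite author's own statement) =====
-- stated objective: alternative
-- what changed: Replaces per-client branch classification with dict increments by cumulative threshold counts (how many ages fall below each of 18/25/45/60); each bucket is the difference of two adjacent cumulative counts.
import Mathlib
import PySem

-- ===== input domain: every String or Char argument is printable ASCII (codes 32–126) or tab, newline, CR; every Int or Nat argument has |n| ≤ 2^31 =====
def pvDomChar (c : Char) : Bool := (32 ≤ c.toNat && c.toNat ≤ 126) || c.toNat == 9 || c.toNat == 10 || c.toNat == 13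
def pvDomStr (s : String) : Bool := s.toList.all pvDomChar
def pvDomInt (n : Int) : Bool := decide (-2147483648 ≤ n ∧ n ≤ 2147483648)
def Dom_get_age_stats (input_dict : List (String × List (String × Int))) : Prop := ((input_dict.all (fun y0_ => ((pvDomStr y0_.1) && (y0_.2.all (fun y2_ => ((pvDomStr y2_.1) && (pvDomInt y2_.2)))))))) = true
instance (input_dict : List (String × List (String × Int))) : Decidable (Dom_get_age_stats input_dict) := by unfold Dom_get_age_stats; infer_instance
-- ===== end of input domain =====

-- ===== PORT A =====
-- B computes the same five bucket counts by cumulative threshold counting instead of per-client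
-- classification; equality of the returned dicts (as item lists) is proved on Pre_.
-- get_age_group: A's if-elif chain, literally.
def get_age_group (age : Int) : String :=
  if age < 18 then "0-18"
  else if age < 25 then "18-25"
  else if age < 45 then "25-45"
  else if age < 60 then "45-60"
  else "60+"

-- A: start from the five-key zero dict; for each user increment the bucket of that user's age.
def get_age_stats (input_dict : List (String × List (String × Int))) : List (String × Int) :=
  let d := PySem.Dict.ofList input_dict
  let stats0 : PySem.Dict String Int :=
    PySem.Dict.mk [("0-18", 0), ("18-25", 0), ("25-45", 0), ("45-60", 0), ("60+", 0)]
  (d.keys.foldl (fun stats user =>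
      let age := (PySem.Dict.ofList (d.getD user [])).getD "age" 0
      let g := get_age_group age
      stats.insert g (stats.getD g 0 + 1)) stats0).items

-- ===== PORT B =====
-- B: collect all ages, count how many lie below each bound, and take differences of adjacent counts.
def get_age_stats_alt (input_dict : List (String × List (String × Int))) : List (String × Int) :=
  let ages := (PySem.Dict.ofList input_dict).values.map
      (fun entry => (PySem.Dict.ofList entry).getD "age" 0)
  let cuts := [(18 : Int), 25, 45, 60].map
      (fun bound => (ages.map (fun age => if age < bound then (1 : Int) else 0)).sum)
  let labels := ["0-18", "18-25", "25-45", "45-60", "60+"]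
  let lows := (0 : Int) :: cuts
  let highs := cuts ++ [(ages.length : Int)]
  ((labels.zip lows).zip highs).map (fun p => (p.1.1, p.2 - p.1.2))

-- ===== PRECONDITION & SPEC =====
-- Pre_ excludes exactly the inputs on which both Pythons raise KeyError: a client record
-- (a value of the dict built from input_dict) without an "age" key.
def Pre_get_age_stats (input_dict : List (String × List (String × Int))) : Prop :=
  ∀ entry ∈ (PySem.Dict.ofList input_dict).values, "age" ∈ entry.map Prod.fst
instance (input_dict : List (String × List (String × Int))) : Decidable (Pre_get_age_stats input_dict) := by
  unfold Pre_get_age_stats; infer_instance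

def pvWitness_get_age_stats : (List (String × List (String × Int))) :=
  [("alice", [("age", 30)]), ("bob", [("age", 17)])]

def Spec_get_age_stats (input_dict : List (String × List (String × Int))) (out : List (String × Int)) : Prop := out = get_age_stats_alt input_dict
instance (input_dict : List (String × List (String × Int))) (out : List (String × Int)) : Decidable (Spec_get_age_stats input_dict out) := by unfold Spec_get_age_stats; infer_instance

-- ===== CLAIM (what is proved, stated in full; the proofs are below) =====
def Claim_equal_get_age_stats : Prop := ∀ (input_dict : List (String × List (String × Int))), Dom_get_age_stats input_dict → Pre_get_age_stats input_dict → Spec_get_age_stats input_dict (get_age_stats input_dict)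

-- ===== LEMMAS AND PROOFS =====

-- One increment step of A on the literal five-key dict, expressed bucket-by-bucket.
theorem step_insert (a c0 c1 c2 c3 c4 : Int) :
    (PySem.Dict.mk [("0-18", c0), ("18-25", c1), ("25-45", c2), ("45-60", c3), ("60+", c4)]).insert
      (get_age_group a)
      ((PySem.Dict.mk [("0-18", c0), ("18-25", c1), ("25-45", c2), ("45-60", c3), ("60+", c4)]).getD (get_age_group a) 0 + 1) =
    PySem.Dict.mk [("0-18", if a < 18 then c0 + 1 else c0),
       ("18-25", if 18 ≤ a ∧ a < 25 then c1 + 1 else c1),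
       ("25-45", if 25 ≤ a ∧ a < 45 then c2 + 1 else c2),
       ("45-60", if 45 ≤ a ∧ a < 60 then c3 + 1 else c3),
       ("60+", if 60 ≤ a then c4 + 1 else c4)] := by
  by_cases h1 : a < 18
  · have hg : get_age_group a = "0-18" := by simp [get_age_group, h1]
    rw [hg, if_pos h1, if_neg (by omega : ¬(18 ≤ a ∧ a < 25)), if_neg (by omega : ¬(25 ≤ a ∧ a < 45)), if_neg (by omega : ¬(45 ≤ a ∧ a < 60)), if_neg (by omega : ¬(60 ≤ a))]; rfl
  · by_cases h2 : a < 25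
    · have hg : get_age_group a = "18-25" := by simp [get_age_group, h1, h2]
      rw [hg, if_neg h1, if_pos (by omega : (18 ≤ a ∧ a < 25)), if_neg (by omega : ¬(25 ≤ a ∧ a < 45)), if_neg (by omega : ¬(45 ≤ a ∧ a < 60)), if_neg (by omega : ¬(60 ≤ a))]; rfl
    · by_cases h3 : a < 45
      · have hg : get_age_group a = "25-45" := by simp [get_age_group, h1, h2, h3]
        rw [hg, if_neg h1, if_neg (by omega : ¬(18 ≤ a ∧ a < 25)), if_pos (by omega : (25 ≤ a ∧ a < 45)), if_neg (by omega : ¬(45 ≤ a ∧ a < 60)), if_neg (by omega : ¬(60 ≤ a))]; rfl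
      · by_cases h4 : a < 60
        · have hg : get_age_group a = "45-60" := by simp [get_age_group, h1, h2, h3, h4]
          rw [hg, if_neg h1, if_neg (by omega : ¬(18 ≤ a ∧ a < 25)), if_neg (by omega : ¬(25 ≤ a ∧ a < 45)), if_pos (by omega : (45 ≤ a ∧ a < 60)), if_neg (by omega : ¬(60 ≤ a))]; rfl
        · have hg : get_age_group a = "60+" := by simp [get_age_group, h1, h2, h3, h4]
          rw [hg, if_neg h1, if_neg (by omega : ¬(18 ≤ a ∧ a < 25)), if_neg (by omega : ¬(25 ≤ a ∧ a < 45)), if_neg (by omega : ¬(45 ≤ a ∧ a < 60)), if_pos (by omega : (60 ≤ a))]; rfl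


-- A's whole counting loop: each bucket value is the count of ages in its half-open range.
theorem fold_counts (ages : List Int) (c0 c1 c2 c3 c4 : Int) :
    ages.foldl (fun stats age =>
        stats.insert (get_age_group age) (stats.getD (get_age_group age) 0 + 1))
      (PySem.Dict.mk [("0-18", c0), ("18-25", c1), ("25-45", c2), ("45-60", c3), ("60+", c4)]) =
    PySem.Dict.mk [("0-18", c0 + ((ages.countP (fun a => decide (a < 18)) : Nat) : Int)),
       ("18-25", c1 + ((ages.countP (fun a => decide (18 ≤ a ∧ a < 25)) : Nat) : Int)),
       ("25-45", c2 + ((ages.countP (fun a => decide (25 ≤ a ∧ a < 45)) : Nat) : Int)),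
       ("45-60", c3 + ((ages.countP (fun a => decide (45 ≤ a ∧ a < 60)) : Nat) : Int)),
       ("60+", c4 + ((ages.countP (fun a => decide (60 ≤ a)) : Nat) : Int))] := by
  induction ages generalizing c0 c1 c2 c3 c4 with
  | nil => simp
  | cons a t ih =>
    simp only [List.foldl_cons, step_insert, ih, List.countP_cons]
    simp only [PySem.Dict.mk.injEq, List.cons.injEq, Prod.mk.injEq]
    refine ⟨⟨trivial, ?_⟩, ⟨trivial, ?_⟩, ⟨trivial, ?_⟩, ⟨trivial, ?_⟩, ⟨trivial, ?_⟩, trivial⟩ <;>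
      · simp only [decide_eq_true_eq]
        push_cast
        split_ifs with h <;> omega


-- A's exclusive range counts are differences of B's cumulative threshold counts.
theorem counts_relation (ages : List Int) :
    ages.countP (fun a => decide (a < 25)) = ages.countP (fun a => decide (a < 18)) + ages.countP (fun a => decide (18 ≤ a ∧ a < 25)) ∧
    ages.countP (fun a => decide (a < 45)) = ages.countP (fun a => decide (a < 25)) + ages.countP (fun a => decide (25 ≤ a ∧ a < 45)) ∧
    ages.countP (fun a => decide (a < 60)) = ages.countP (fun a => decide (a < 45)) + ages.countP (fun a => decide (45 ≤ a ∧ a < 60)) ∧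
    ages.length = ages.countP (fun a => decide (a < 60)) + ages.countP (fun a => decide (60 ≤ a)) := by
  induction ages with
  | nil => simp
  | cons a t ih =>
    obtain ⟨i1, i2, i3, i4⟩ := ih
    simp only [List.countP_cons, List.length_cons, decide_eq_true_eq]
    split_ifs <;> omega


-- The two ports agree on every input (the ports are total; Pre_ marks where the Pythons return).
theorem main_thm (input_dict : List (String × List (String × Int))) :
    get_age_stats input_dict = get_age_stats_alt input_dict := by
  unfold get_age_stats get_age_stats_alt
  set d := PySem.Dict.ofList input_dict with hd
  set ageOf : List (String × Int) → Int := fun entry => (PySem.Dict.ofList entry).getD "age" 0 with hageOf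
  set ages : List Int := d.values.map ageOf with hages
  have hkeys : d.keys = d.items.map Prod.fst := rfl
  have hvals : d.values = d.items.map Prod.snd := rfl
  have hstep : d.keys.foldl (fun stats user =>
      stats.insert (get_age_group ((PySem.Dict.ofList (d.getD user [])).getD "age" 0))
        (stats.getD (get_age_group ((PySem.Dict.ofList (d.getD user [])).getD "age" 0)) 0 + 1))
      (PySem.Dict.mk [("0-18", (0:Int)), ("18-25", 0), ("25-45", 0), ("45-60", 0), ("60+", 0)]) =
      ages.foldl (fun stats age =>
        stats.insert (get_age_group age) (stats.getD (get_age_group age) 0 + 1))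
      (PySem.Dict.mk [("0-18", 0), ("18-25", 0), ("25-45", 0), ("45-60", 0), ("60+", 0)]) := by
    rw [hkeys, List.foldl_map]
    rw [hages, hvals, List.map_map, List.foldl_map]
    apply PySem.List.foldl_congr_mem
    intro acc p hp
    have : d.getD p.1 [] = p.2 :=
      PySem.Dict.getD_of_mem_items d (by exact hp) (PySem.Dict.nodup_keys_ofList input_dict) []
    rw [this]; rfl
  simp only []
  rw [hstep, fold_counts]
  have hsum : ∀ b : Int, (ages.map (fun a => if a < b then (1 : Int) else 0)).sum
      = ((ages.countP (fun a => decide (a < b)) : Nat) : Int) := by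
    intro b
    simpa using PySem.List.sum_map_ite_one_zero (fun a : Int => decide (a < b)) ages
  obtain ⟨r1, r2, r3, r4⟩ := counts_relation ages
  simp only [Bool.decide_and] at r1 r2 r3 r4
  simp only [List.map_cons, List.map_nil, List.zip, List.zipWith, hsum]
  refine List.ext_getElem (by simp) ?_
  intro i h1 h2
  simp only [List.length_cons, List.length_nil] at h1
  interval_cases i <;> simp <;> omega

-- ===== VERDICT (by name: the statement is the Claim_ definition above) =====
theorem get_age_stats_spec : Claim_equal_get_age_stats := by
  intro input_dict _ _
  unfold Spec_get_age_stats
  exact main_thm input_dict
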